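-- pv_equiv track=rewrite | github.com/kvesik/dissertation | scripts/generate_tableaux_otsoft_specifylang.py | checksetsinpositions
-- ===== SOURCE A (Python) =====
-- initial = "initial"
--
-- noninitial = "noninitial"
--
-- anywhere = "anywhere"
--
-- def checksetsinpositions(vowelset, position, candidate):
--     checkinit = position == initial or position == anywhere
--     checknoninit = position == noninitial or position == anywhere
--     for idx, v in enumerate(candidate):
--         if idx == 0 and checkinit and v in vowelset:
--             return True
--         elif idx > 0 and checknoninit and v in vowelset:
--             return True
--     return False
-- ===== SOURCE B (Python) =====
-- initial = "initial"
-- noninitial = "noninitial"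
-- anywhere = "anywhere"
--
-- def checksetsinpositions(vowelset, position, candidate):
--     vs = set(vowelset)
--     if position == anywhere:
--         return not vs.isdisjoint(candidate)
--     if position == initial:
--         return bool(candidate) and candidate[0] in vs
--     if position == noninitial:
--         return not vs.isdisjoint(candidate[1:])
--     return False
-- ===== Notes on version B (the rewrite author's own statement) =====
-- stated objective: alternative
-- what changed: Replaces the flag-computing enumerate loop with a direct dispatch on the position string and hash-set operations: build set(vowelset) once, then one isdisjoint test (whole list, head only, or tail) per case.
import Mathlib
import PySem

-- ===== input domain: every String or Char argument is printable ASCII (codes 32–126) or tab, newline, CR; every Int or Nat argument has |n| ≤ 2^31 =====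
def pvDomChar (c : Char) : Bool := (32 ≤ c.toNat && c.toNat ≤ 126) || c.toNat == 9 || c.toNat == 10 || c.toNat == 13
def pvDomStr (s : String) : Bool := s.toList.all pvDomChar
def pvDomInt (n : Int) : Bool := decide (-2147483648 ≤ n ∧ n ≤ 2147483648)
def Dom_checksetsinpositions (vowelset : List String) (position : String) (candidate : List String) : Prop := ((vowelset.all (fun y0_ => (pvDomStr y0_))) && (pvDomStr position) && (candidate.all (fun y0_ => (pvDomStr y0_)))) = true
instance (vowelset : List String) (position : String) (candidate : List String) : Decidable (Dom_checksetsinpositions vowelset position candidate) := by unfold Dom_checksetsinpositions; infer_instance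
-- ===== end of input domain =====

-- B replaces A's flag-computing enumerate loop with a direct dispatch on the position string and set-disjointness tests; same task, different decomposition.


-- ===== PORT A =====
-- the enumerate loop of A, early return encoded as the recursion's result
def csipLoopA (vowelset : List String) (checkinit checknoninit : Bool) : Nat → List String → Bool
  | _, [] => false
  | idx, v :: rest =>
    if idx == 0 && checkinit && vowelset.contains v then true
    else if decide (idx > 0) && checknoninit && vowelset.contains v then true
    else csipLoopA vowelset checkinit checknoninit (idx + 1) rest

def checksetsinpositions (vowelset : List String) (position : String) (candidate : List String) : Bool :=
  let checkinit := position == "initial" || position == "anywhere"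
  let checknoninit := position == "noninitial" || position == "anywhere"
  csipLoopA vowelset checkinit checknoninit 0 candidate

-- ===== PORT B =====
def checksetsinpositions_alt (vowelset : List String) (position : String) (candidate : List String) : Bool :=
  let vs : PySem.Set String := PySem.Set.ofList vowelset
  if position == "anywhere" then !(PySem.Set.isdisjoint vs candidate)
  else if position == "initial" then
    (match candidate with
     | [] => false
     | v :: _ => PySem.Set.contains vs v)
  else if position == "noninitial" then !(PySem.Set.isdisjoint vs (candidate.drop 1))
  else false

-- ===== PRECONDITION & SPEC =====
def Spec_checksetsinpositions (vowelset : List String) (position : String) (candidate : List String) (out : Bool) : Prop := out = checksetsinpositions_alt vowelset position candidate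
instance (vowelset : List String) (position : String) (candidate : List String) (out : Bool) : Decidable (Spec_checksetsinpositions vowelset position candidate out) := by unfold Spec_checksetsinpositions; infer_instance

-- ===== CLAIM (what is proved, stated in full; the proofs are below) =====
def Claim_equal_checksetsinpositions : Prop := ∀ (vowelset : List String) (position : String) (candidate : List String), Dom_checksetsinpositions vowelset position candidate → Spec_checksetsinpositions vowelset position candidate (checksetsinpositions vowelset position candidate)

-- ===== LEMMAS AND PROOFS =====
-- A's loop from index 1 on is a plain membership scan of the remaining list
theorem csipLoopA_tail (vowelset : List String) (checkinit checknoninit : Bool)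
    (l : List String) (n : Nat) :
    csipLoopA vowelset checkinit checknoninit (n + 1) l
      = (checknoninit && l.any (fun v => vowelset.contains v)) := by
  induction l generalizing n with
  | nil => simp [csipLoopA]
  | cons v rest ih =>
    simp only [csipLoopA, List.any_cons]
    rw [ih]
    cases checknoninit <;> cases hc : vowelset.contains v <;> simp [hc]

-- not-disjoint of set(vowelset) with l is a membership scan of l
theorem not_isdisjoint_ofList (vowelset l : List String) :
    (!PySem.Set.isdisjoint (PySem.Set.ofList vowelset) l)
      = l.any (fun v => vowelset.contains v) := by
  by_cases hex : ∃ x ∈ l, x ∈ vowelset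
  · obtain ⟨x, hxl, hxv⟩ := hex
    have hdf : PySem.Set.isdisjoint (PySem.Set.ofList vowelset) l = false := by
      by_contra hne
      have ht : PySem.Set.isdisjoint (PySem.Set.ofList vowelset) l = true := by
        revert hne
        cases PySem.Set.isdisjoint (PySem.Set.ofList vowelset) l <;> simp
      exact ((PySem.Set.isdisjoint_iff _ _).mp ht x
        ((PySem.Set.mem_ofList _ _).mpr hxv)) hxl
    rw [hdf]
    symm
    simp only [Bool.not_false, List.any_eq_true]
    exact ⟨x, hxl, by simp [List.contains_eq_mem, hxv]⟩
  · push Not at hex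
    have ht : PySem.Set.isdisjoint (PySem.Set.ofList vowelset) l = true :=
      (PySem.Set.isdisjoint_iff _ _).mpr
        (fun x hx hxl => hex x hxl ((PySem.Set.mem_ofList _ _).mp hx))
    rw [ht]
    symm
    simp only [Bool.not_true, List.any_eq_false]
    intro x hxl
    simpa [List.contains_eq_mem] using hex x hxl

theorem contains_ofList (vowelset : List String) (v : String) :
    PySem.Set.contains (PySem.Set.ofList vowelset) v = vowelset.contains v := by
  simp [PySem.Set.contains, List.contains_eq_mem, PySem.Set.mem_ofList]

-- ===== VERDICT (by name: the statement is the Claim_ definition above) =====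
theorem checksetsinpositions_spec : Claim_equal_checksetsinpositions := by
  intro vowelset position candidate _
  unfold Spec_checksetsinpositions checksetsinpositions checksetsinpositions_alt
  simp only [not_isdisjoint_ofList, contains_ofList]
  cases candidate with
  | nil =>
    simp only [csipLoopA, List.drop_nil, List.any_nil]
    split_ifs <;> rfl
  | cons v rest =>
    simp only [csipLoopA, List.drop_succ_cons, List.drop_zero, List.any_cons]
    rw [csipLoopA_tail]
    by_cases h1 : position = "anywhere" <;> by_cases h2 : position = "initial" <;>
      by_cases h3 : position = "noninitial" <;>
      simp_all [beq_iff_eq]
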